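-- pv_equiv track=rewrite | github.com/skygentwu/miniopc-write-report | create_ppt_ai_paradigm_v2.py | split_content_by_items
-- ===== SOURCE A (Python) =====
-- def split_content_by_items(content_lines, max_items=10):
--     """按条目数分页，每页最多10个有效条目（确保绝不超页）"""
--     pages = []
--     current_page = []
--     current_count = 0
--
--     for line in content_lines:
--         is_content = line.strip() != ''
--
--         # 如果当前页已满且有内容，新建一页
--         if current_count >= max_items and is_content and current_page:
--             pages.append(current_page)
--             current_page = [line]
--             current_count = 1 if is_content else 0
--         else:
--             current_page.append(line)
--             if is_content:
--                 current_count += 1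
--
--     if current_page:
--         pages.append(current_page)
--
--     return pages
-- ===== SOURCE B (Python) =====
-- def split_content_by_items(content_lines, max_items=10):
--     """Chunking re-implementation: find each page's end index, slice, advance."""
--     n = len(content_lines)
--     pages = []
--     i = 0
--     while i < n:
--         count = 1 if content_lines[i].strip() else 0
--         j = i + 1
--         while j < n:
--             if content_lines[j].strip() and count >= max_items:
--                 break
--             if content_lines[j].strip():
--                 count += 1
--             j += 1
--         pages.append(content_lines[i:j])
--         i = j
--     return pages
-- ===== Notes on version B (the rewrite author's own statement) =====
-- stated objective: alternative
-- what changed: Instead of one fold growing a current page and a pages accumulator, B computes each page's end index with an inner scan and materializes the page by slicing, advancing chunk by chunk.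
import Mathlib
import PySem

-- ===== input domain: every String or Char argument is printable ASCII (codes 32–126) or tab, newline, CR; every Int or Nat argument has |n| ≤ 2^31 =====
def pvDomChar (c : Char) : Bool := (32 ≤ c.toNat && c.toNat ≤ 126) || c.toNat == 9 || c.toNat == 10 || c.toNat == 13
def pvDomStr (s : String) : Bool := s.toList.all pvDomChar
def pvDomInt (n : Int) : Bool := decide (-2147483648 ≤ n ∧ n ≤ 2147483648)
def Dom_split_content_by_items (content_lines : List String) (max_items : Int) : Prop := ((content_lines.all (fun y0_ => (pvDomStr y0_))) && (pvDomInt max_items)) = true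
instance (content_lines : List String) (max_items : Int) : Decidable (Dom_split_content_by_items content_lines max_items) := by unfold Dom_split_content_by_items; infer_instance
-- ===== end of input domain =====

-- B is an alternative decomposition: it cuts the input into pages chunk by chunk
-- (compute one page's length, slice it off, advance) instead of A's single fold
-- that grows a current page and a page accumulator. Same cost, no speed claim.

-- ===== PORT A =====
-- A-side helper: the body of A's for-loop on state (pages, current_page, current_count).
def pvStepA (max_items : Int) (st : List (List String) × List String × Int) (line : String) :
    List (List String) × List String × Int :=
  let pages := st.1
  let current_page := st.2.1
  let current_count := st.2.2
  let is_content : Bool := PySem.Str.strip line != ""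
  if decide (current_count ≥ max_items) && is_content && !current_page.isEmpty then
    (pages ++ [current_page], [line], if is_content then (1 : Int) else 0)
  else
    (pages, current_page ++ [line], current_count + (if is_content then 1 else 0))

-- A: one pass; start a new page when the count is full, the line is non-blank
-- and the current page is non-empty; flush the last page at the end.
def split_content_by_items (content_lines : List String) (max_items : Int) : List (List String) :=
  let st := content_lines.foldl (pvStepA max_items) ([], [], 0)
  if !st.2.1.isEmpty then st.1 ++ [st.2.1] else st.1

-- ===== PORT B =====
-- B-side helper: the inner scan of Source B — how many further lines still fit on the
-- current page, given `count` items already on it.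
def pvPageLen (lines : List String) (count : Int) (max_items : Int) : Nat :=
  match lines with
  | [] => 0
  | l :: ls =>
    if (PySem.Str.strip l != "") && decide (count ≥ max_items) then 0
    else 1 + pvPageLen ls (count + (if PySem.Str.strip l != "" then 1 else 0)) max_items

-- B-side helper: the outer loop of Source B — slice off one page, continue on the rest.
def pvPages (rest : List String) (max_items : Int) : List (List String) :=
  match rest with
  | [] => []
  | h :: t =>
    let c : Int := if PySem.Str.strip h != "" then 1 else 0
    let k := pvPageLen t c max_items
    (h :: t.take k) :: pvPages (t.drop k) max_items
termination_by rest.length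
decreasing_by
  simp only [List.length_cons, List.length_drop]
  exact Nat.lt_succ_of_le (Nat.sub_le _ _)

def split_content_by_items_alt (content_lines : List String) (max_items : Int) : List (List String) :=
  pvPages content_lines max_items

-- ===== PRECONDITION & SPEC =====
def Spec_split_content_by_items (content_lines : List String) (max_items : Int) (out : List (List String)) : Prop := out = split_content_by_items_alt content_lines max_items
instance (content_lines : List String) (max_items : Int) (out : List (List String)) : Decidable (Spec_split_content_by_items content_lines max_items out) := by unfold Spec_split_content_by_items; infer_instance

-- ===== CLAIM (what is proved, stated in full; the proofs are below) =====
def Claim_equal_split_content_by_items : Prop := ∀ (content_lines : List String) (max_items : Int), Dom_split_content_by_items content_lines max_items → Spec_split_content_by_items content_lines max_items (split_content_by_items content_lines max_items)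

-- ===== LEMMAS AND PROOFS =====

theorem pvPages_nil (m : Int) : pvPages [] m = [] := by
  rw [pvPages.eq_def]

theorem pvPages_cons (h : String) (t : List String) (m : Int) :
    pvPages (h :: t) m =
      (h :: t.take (pvPageLen t (if PySem.Str.strip h != "" then (1:Int) else 0) m)) ::
        pvPages (t.drop (pvPageLen t (if PySem.Str.strip h != "" then (1:Int) else 0) m)) m := by
  rw [pvPages.eq_def]

-- Proof-only intermediate form of A's loop once the current page is non-empty.
def pvExtend (lines : List String) (cp : List String) (c : Int) (max_items : Int) : List (List String) :=
  match lines with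
  | [] => [cp]
  | l :: ls =>
    if (PySem.Str.strip l != "") && decide (c ≥ max_items) then
      cp :: pvExtend ls [l] 1 max_items
    else
      pvExtend ls (cp ++ [l]) (c + (if PySem.Str.strip l != "" then 1 else 0)) max_items

theorem pvExtend_eq_pages (lines : List String) (cp : List String) (c : Int) (m : Int) :
    pvExtend lines cp c m =
      (cp ++ lines.take (pvPageLen lines c m)) :: pvPages (lines.drop (pvPageLen lines c m)) m := by
  induction lines generalizing cp c with
  | nil => simp [pvExtend, pvPageLen, pvPages_nil]
  | cons l ls ih =>
    by_cases h : ((PySem.Str.strip l != "") && decide (c ≥ m)) = true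
    · obtain ⟨hnb, hc⟩ := by simpa using h
      rw [pvExtend, pvPageLen, if_pos h, if_pos h]
      rw [ih]
      simp only [List.take_zero, List.drop_zero, List.append_nil]
      rw [pvPages_cons]
      simp [hnb]
    · rw [pvExtend, pvPageLen, if_neg h, if_neg h]
      rw [ih]
      simp [Nat.one_add]

-- A's fold, started from a non-empty current page, produces pages ++ pvExtend.
theorem pvFoldA (m : Int) (lines : List String) (pages : List (List String)) (cp : List String)
    (c : Int) (hcp : cp ≠ []) :
    (let st := lines.foldl (pvStepA m) (pages, cp, c)
     if !st.2.1.isEmpty then st.1 ++ [st.2.1] else st.1) = pages ++ pvExtend lines cp c m := by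
  induction lines generalizing pages cp c with
  | nil => simp [pvExtend, List.isEmpty_eq_false_iff.mpr hcp]
  | cons l ls ih =>
    simp only [List.foldl_cons]
    by_cases h : ((PySem.Str.strip l != "") && decide (c ≥ m)) = true
    · obtain ⟨hnb, hc⟩ : (PySem.Str.strip l != "") = true ∧ decide (c ≥ m) = true := by simpa using h
      have hstep : pvStepA m (pages, cp, c) l = (pages ++ [cp], [l], 1) := by
        simp [pvStepA, hnb, hc, List.isEmpty_eq_false_iff.mpr hcp]
      rw [hstep, ih (pages ++ [cp]) [l] 1 (by simp)]
      rw [pvExtend, if_pos h]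
      simp
    · have hstep : pvStepA m (pages, cp, c) l =
          (pages, cp ++ [l], c + (if PySem.Str.strip l != "" then 1 else 0)) := by
        by_cases hnb : (PySem.Str.strip l != "") = true
        · have hc : decide (c ≥ m) = false := by
            cases hd : decide (c ≥ m) with
            | false => rfl
            | true => exact absurd (by simp [hnb, hd]) h
          simp [pvStepA, hc]
        · simp [pvStepA, Bool.eq_false_iff.mpr hnb]
      rw [hstep, ih pages (cp ++ [l]) _ (by simp)]
      rw [pvExtend, if_neg h]

-- ===== VERDICT (by name: the statement is the Claim_ definition above) =====
theorem split_content_by_items_spec : Claim_equal_split_content_by_items := by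
  intro content_lines max_items _
  unfold Spec_split_content_by_items split_content_by_items_alt
  cases content_lines with
  | nil => simp [split_content_by_items, pvPages_nil]
  | cons h t =>
    unfold split_content_by_items
    simp only [List.foldl_cons]
    have hstep : pvStepA max_items ([], [], 0) h =
        ([], [h], if PySem.Str.strip h != "" then (1:Int) else 0) := by
      simp [pvStepA]
    rw [hstep, pvFoldA max_items t [] [h] _ (by simp)]
    rw [pvExtend_eq_pages, pvPages_cons]
    simp
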